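-- pv_equiv track=rewrite | github.com/chrisjdavie/interview_practice | leetcode/zigzag_conversion/first.py | inputCoords
-- ===== SOURCE A (Python) =====
-- from itertools import count, zip_longest
-- from typing import Iterator
--
-- def inputCoords(numRows: int, lenS: int) -> Iterator[tuple[int, int]]:
--
--     def cols_iterator(numRows: int) -> Iterator[tuple[int, int]]:
--         columns: Iterator[int] = count()
--         while True:
--             this_column: int = next(columns)
--             for i in range(numRows):
--                 yield (i, this_column)
--             for i in range(numRows-2, 0, -1):
--                 yield (i, next(columns))
--
--     for res, _ in zip(cols_iterator(numRows), range(lenS)):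
--         yield res
-- ===== SOURCE B (Python) =====
-- def inputCoords(numRows: int, lenS: int):
--     # closed-form index -> (row, col); numRows == 1 special-cased (cycle would be 0)
--     if numRows == 1:
--         for idx in range(lenS):
--             yield (0, idx)
--         return
--     cycle = 2 * numRows - 2
--     for idx in range(lenS):
--         q, pos = divmod(idx, cycle)
--         if pos < numRows:
--             yield (pos, q * (numRows - 1))
--         else:
--             yield (cycle - pos, q * (numRows - 1) + pos - numRows + 1)
-- ===== Notes on version B (the rewrite author's own statement) =====
-- stated objective: alternative
-- what changed: Replaced A's stateful infinite generator (nested column counter + zip truncation) with a direct closed-form index-to-(row,col) formula via divmod(idx, 2*numRows-2), numRows==1 special-cased.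
import Mathlib
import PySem

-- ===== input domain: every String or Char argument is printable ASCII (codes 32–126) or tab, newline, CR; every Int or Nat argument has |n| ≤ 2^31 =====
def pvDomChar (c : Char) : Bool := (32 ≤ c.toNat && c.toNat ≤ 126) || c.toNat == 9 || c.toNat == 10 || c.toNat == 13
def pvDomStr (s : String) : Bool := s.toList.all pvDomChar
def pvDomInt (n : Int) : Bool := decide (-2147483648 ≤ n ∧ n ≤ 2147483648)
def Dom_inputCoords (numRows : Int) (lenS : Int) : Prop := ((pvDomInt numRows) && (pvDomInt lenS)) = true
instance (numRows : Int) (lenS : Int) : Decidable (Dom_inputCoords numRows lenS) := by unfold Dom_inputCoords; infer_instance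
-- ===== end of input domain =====

-- B replaces A's stateful infinite generator (column counter + zip truncation) with a closed-form
-- index->(row,col) formula (alternative, same cost). A diverges for numRows ≤ 0 (its generator loops
-- forever yielding nothing, even for lenS ≤ 0, since zip pulls from it first): excluded by Pre_.


-- ===== PORT A =====
-- Consume the infinite stream block by block; zip(…, range(lenS)) truncates each of the two
-- for-loops by the remaining budget `n` (so only the yielded prefix of a block is ever built).
-- If a block is empty (numRows ≤ 0) the Python generator loops forever yielding nothing; the port
-- returns [] there — those inputs are outside Pre_.
def pvLoopA (numRows : Int) (col : Int) (n : Nat) : List (Int × Int) :=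
  if _hn : n = 0 then []
  else
    if _hb : numRows.toNat + (numRows - 2).toNat = 0 then []
    else
      ((List.range (min n numRows.toNat)).map (fun i : Nat => ((i : Int), col)) ++
        (List.range (min (n - numRows.toNat) (numRows - 2).toNat)).map
          (fun j : Nat => (numRows - 2 - (j : Int), col + 1 + (j : Int)))) ++
      pvLoopA numRows (col + 1 + (((numRows - 2).toNat : Nat) : Int))
        (n - numRows.toNat - (numRows - 2).toNat)
termination_by n
decreasing_by omega

def inputCoords (numRows : Int) (lenS : Int) : List (Int × Int) :=
  pvLoopA numRows 0 lenS.toNat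

-- ===== PORT B =====
def inputCoords_alt (numRows : Int) (lenS : Int) : List (Int × Int) :=
  if numRows = 1 then
    (PySem.List.pyRange 0 lenS 1).map (fun idx => ((0 : Int), idx))
  else
    (PySem.List.pyRange 0 lenS 1).map (fun idx =>
      let cycle := 2 * numRows - 2
      let q := PySem.Int.floordiv idx cycle
      let pos := PySem.Int.mod idx cycle
      if pos < numRows then (pos, q * (numRows - 1))
      else (cycle - pos, q * (numRows - 1) + pos - numRows + 1))

-- ===== PRECONDITION & SPEC =====
-- Pre_ excludes numRows ≤ 0, on which A never returns (its generator spins forever yielding nothing).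
def Pre_inputCoords (numRows : Int) (lenS : Int) : Prop := 1 ≤ numRows
instance (numRows : Int) (lenS : Int) : Decidable (Pre_inputCoords numRows lenS) := by unfold Pre_inputCoords; infer_instance
def pvWitness_inputCoords : Int × Int := (3, 8)

def Spec_inputCoords (numRows : Int) (lenS : Int) (out : List (Int × Int)) : Prop := out = inputCoords_alt numRows lenS
instance (numRows : Int) (lenS : Int) (out : List (Int × Int)) : Decidable (Spec_inputCoords numRows lenS out) := by unfold Spec_inputCoords; infer_instance

-- ===== CLAIM (what is proved, stated in full; the proofs are below) =====
def Claim_equal_inputCoords : Prop := ∀ (numRows : Int) (lenS : Int), Dom_inputCoords numRows lenS → Pre_inputCoords numRows lenS → Spec_inputCoords numRows lenS (inputCoords numRows lenS)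

-- ===== LEMMAS AND PROOFS =====

-- One while-iteration of cols_iterator at column counter `col`:
-- 'for i in range(numRows): yield (i, this_column)' then 'for i in range(numRows-2, 0, -1): yield (i, next(columns))'
-- (each inner yield consumes the next column counter value, hence the zipIdx offset col+1+p.2).
def pvBlockA (numRows : Int) (col : Int) : List (Int × Int) :=
  (PySem.List.pyRange 0 numRows 1).map (fun i => (i, col)) ++
    ((PySem.List.pyRange (numRows - 2) 0 (-1)).zipIdx.map (fun p => (p.1, col + 1 + (p.2 : Int))))

-- closed form (row, col) of the k-th entry of the block beginning at column counter `col`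
def pvG (numRows col : Int) (k : Nat) : Int × Int :=
  if (k : Int) < numRows then ((k : Int), col) else (2 * numRows - 2 - k, col + (k : Int) - numRows + 1)

theorem pvZipIdxRange (m : Nat) : (List.range m).zipIdx = (List.range m).map (fun j => (j, j)) := by
  apply List.ext_getElem <;> simp [List.getElem_zipIdx]

theorem pvBlockEq (numRows : Int) (h2 : 2 ≤ numRows) (col : Int) :
    pvBlockA numRows col = (List.range (2 * numRows - 2).toNat).map (pvG numRows col) := by
  unfold pvBlockA
  rw [PySem.List.pyRange_one, PySem.List.pyRange_neg_one, List.zipIdx_map, pvZipIdxRange]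
  apply List.ext_getElem
  · simp; omega
  · intro i h1 h2'
    simp only [List.getElem_append, List.getElem_map, List.getElem_range, List.length_map,
      List.length_range, pvG]
    split_ifs with hc hg hg
    · congr 1; omega
    · exfalso; simp at hc; omega
    · exfalso; simp at hc hg; omega
    · simp at hc
      simp only [Prod.map, id, Prod.mk.injEq]
      omega

theorem pvTakeBlock (numRows col : Int) (n : Nat) :
    (pvBlockA numRows col).take n =
      (List.range (min n numRows.toNat)).map (fun i : Nat => ((i : Int), col)) ++
        (List.range (min (n - numRows.toNat) (numRows - 2).toNat)).map
          (fun j : Nat => (numRows - 2 - (j : Int), col + 1 + (j : Int))) := by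
  unfold pvBlockA
  rw [List.take_append]
  congr 1
  · rw [PySem.List.pyRange_one, List.map_map, ← List.map_take, List.take_range]
    simp only [sub_zero]
    apply List.map_congr_left
    intro k _
    simp
  · rw [PySem.List.pyRange_neg_one, List.zipIdx_map, pvZipIdxRange]
    simp only [List.map_map, List.length_map]
    rw [← List.map_take, List.take_range]
    simp only [PySem.List.length_pyRange_one, sub_zero]
    apply List.map_congr_left
    intro k _
    simp [Prod.map]

theorem pvLoopA_eq (numRows col : Int) (n : Nat) :
    pvLoopA numRows col n =
      if n = 0 then []
      else if (pvBlockA numRows col).length = 0 then []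
      else (pvBlockA numRows col).take n ++
        pvLoopA numRows (col + 1 + (((numRows - 2).toNat : Nat) : Int)) (n - (pvBlockA numRows col).length) := by
  have hlen : (pvBlockA numRows col).length = numRows.toNat + (numRows - 2).toNat := by
    simp [pvBlockA, PySem.List.length_pyRange_one, PySem.List.length_pyRange_neg_one]
  rw [pvLoopA, hlen]
  split_ifs with h1 h2
  · rfl
  · rfl
  · rw [pvTakeBlock, Nat.sub_sub]

theorem pvLoop_one (col : Int) (n : Nat) :
    pvLoopA 1 col n = (List.range n).map (fun k : Nat => ((0 : Int), col + (k : Int))) := by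
  induction n generalizing col with
  | zero => simp [pvLoopA]
  | succ n ih =>
    have hb : pvBlockA 1 col = [((0 : Int), col)] := by
      norm_num [pvBlockA, PySem.List.pyRange_one, PySem.List.pyRange_neg_one_eq_nil]
    rw [pvLoopA_eq, if_neg (Nat.succ_ne_zero n), hb]
    norm_num
    rw [ih, List.range_succ_eq_map, List.map_cons, List.map_map]
    congr 1
    · norm_num
    · apply List.map_congr_left
      intro k _
      simp only [Function.comp]
      push_cast
      ring_nf

theorem pvLoop_ge2 (numRows : Int) (h2 : 2 ≤ numRows) (n q : Nat) :
    pvLoopA numRows ((q : Int) * (numRows - 1)) n =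
      (List.range n).map (fun k =>
        pvG numRows (((q + k / (2 * numRows - 2).toNat : Nat) : Int) * (numRows - 1))
          (k % (2 * numRows - 2).toNat)) := by
  generalize hc : (2 * numRows - 2).toNat = c
  have hcpos : 0 < c := by omega
  induction n using Nat.strong_induction_on generalizing q with
  | _ n ih =>
    rcases Nat.eq_zero_or_pos n with hn | hn
    · subst hn; simp [pvLoopA]
    rw [pvLoopA_eq, if_neg (by omega)]
    rw [pvBlockEq numRows h2, hc] at *
    have hlen : ((List.range c).map (pvG numRows ((q : Int) * (numRows - 1)))).length = c := by simp
    rw [if_neg (by omega)]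
    have hcol : (q : Int) * (numRows - 1) + 1 + (((numRows - 2).toNat : Nat) : Int)
        = ((q + 1 : Nat) : Int) * (numRows - 1) := by
      push_cast [Int.toNat_of_nonneg (by omega : (0:Int) ≤ numRows - 2)]
      ring
    rw [hlen, hcol, ih (n - c) (by omega) (q + 1)]
    by_cases hnc : n ≤ c
    · have : n - c = 0 := by omega
      rw [this]
      simp only [List.range_zero, List.map_nil, List.append_nil]
      rw [← List.map_take, List.take_range, min_eq_left hnc]
      apply List.map_congr_left
      intro k hk
      simp at hk
      rw [Nat.div_eq_of_lt (by omega), Nat.mod_eq_of_lt (by omega)]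
      norm_num
    · have hnc : c < n := by omega
      rw [List.take_of_length_le (by simp; omega)]
      have : n = c + (n - c) := by omega
      rw [this, List.range_add, List.map_append, List.map_map]
      congr 1
      · apply List.map_congr_left
        intro k hk
        simp at hk
        rw [Nat.div_eq_of_lt (by omega), Nat.mod_eq_of_lt (by omega)]
        norm_num
      · rw [Nat.add_sub_cancel_left]
        apply List.map_congr_left
        intro k _
        simp only [Function.comp]
        rw [Nat.add_comm c k, Nat.add_div_right _ hcpos, Nat.add_mod_right]
        congr 2
        omega

-- ===== VERDICT (by name: the statement is the Claim_ definition above) =====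
theorem inputCoords_spec : Claim_equal_inputCoords := by
  intro numRows lenS _ hpre
  unfold Spec_inputCoords inputCoords inputCoords_alt
  by_cases h1 : numRows = 1
  · subst h1
    rw [if_pos rfl, pvLoop_one, PySem.List.pyRange_one, List.map_map]
    simp only [sub_zero]
    apply List.map_congr_left
    intro k _
    simp
  · have h2 : 2 ≤ numRows := by unfold Pre_inputCoords at hpre; omega
    rw [if_neg h1]
    have hmain := pvLoop_ge2 numRows h2 lenS.toNat 0
    simp only [Nat.zero_add, zero_mul, Nat.cast_zero] at hmain
    rw [hmain, PySem.List.pyRange_one, List.map_map]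
    simp only [sub_zero]
    apply List.map_congr_left
    intro k _
    simp only [Function.comp, pvG, zero_add]
    have hcyc : (((2 * numRows - 2).toNat : Int)) = 2 * numRows - 2 := Int.toNat_of_nonneg (by omega)
    rw [← hcyc, PySem.Int.floordiv_natCast, PySem.Int.mod_natCast]
    simp only [hcyc]
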